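-- pv_equiv track=rewrite | github.com/xuychen/Leetcode | 1301-1400/1311-1320/1319-numOfOperationsToConnectNetwork/numOfOperationsToConnectNetwork-uf.py | makeConnected
-- ===== SOURCE A (Python) =====
-- class UnionFind(object):
--     def __init__(self):
--         self.table = {}
--
--     def find(self, x):
--         self.table.setdefault(x, x)
--         return x if self.table[x] == x else self.find(self.table[x])
--
--     def union(self, x, y):
--         self.table[self.find(x)] = self.find(y)
--
-- def makeConnected(n, connections):
--     """
--     :type n: int
--     :type connections: List[List[int]]
--     :rtype: int
--     """
--
--     uf = UnionFind()
--     size = len(connections)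
--     count = 0
--     if size < n - 1:
--         return -1
--
--     for start, end in connections:
--         if uf.find(start) == uf.find(end):
--             count += 1
--         else:
--             uf.union(start, end)
--
--     return count - (size - n + 1)
-- ===== SOURCE B (Python) =====
-- def makeConnected(n, connections):
--     # Quick-find: node -> component label dict, relabel on merge; answer n-1-merges.
--     if len(connections) < n - 1:
--         return -1
--     comp = {}
--     merges = 0
--     for u, v in connections:
--         cu = comp.setdefault(u, u)
--         cv = comp.setdefault(v, v)
--         if cu != cv:
--             merges += 1
--             comp = {x: (cv if c == cu else c) for x, c in comp.items()}
--     return n - 1 - merges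
-- ===== Notes on version B (the rewrite author's own statement) =====
-- stated objective: alternative
-- what changed: Replaces the recursive parent-forest union-find (find by chasing parent pointers, union by reparenting roots, redundant-edge counter) with a flat quick-find dict mapping each node to a component label, relabelling one class per merge, and returns n - 1 - merges in closed form.
import Mathlib
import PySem

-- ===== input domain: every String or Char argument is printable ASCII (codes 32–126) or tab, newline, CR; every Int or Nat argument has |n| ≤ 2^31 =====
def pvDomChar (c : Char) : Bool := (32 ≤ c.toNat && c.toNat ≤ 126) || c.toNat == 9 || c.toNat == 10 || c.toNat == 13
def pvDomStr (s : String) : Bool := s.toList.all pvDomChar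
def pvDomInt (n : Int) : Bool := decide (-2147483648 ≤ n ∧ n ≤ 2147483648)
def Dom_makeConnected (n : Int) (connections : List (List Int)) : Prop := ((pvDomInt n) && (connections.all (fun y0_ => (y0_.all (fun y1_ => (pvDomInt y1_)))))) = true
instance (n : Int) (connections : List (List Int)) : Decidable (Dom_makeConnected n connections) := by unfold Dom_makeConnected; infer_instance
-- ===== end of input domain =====

-- B replaces A's recursive parent-forest union-find by a flat quick-find label dict
-- (relabel one class on each merge) and returns n - 1 - merges directly (objective: alternative).

-- ===== PORT A =====
-- UnionFind.find: table.setdefault(x, x); return x if table[x] == x else find(table[x]).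
-- The fuel argument only makes the recursion total; on the forest states A builds it never runs out.
def findA : Nat → PySem.Dict Int Int → Int → PySem.Dict Int Int × Int
  | fuel, d, x =>
    let d1 := PySem.Dict.setdefault d x x
    let p := PySem.Dict.getD d1 x x
    if p = x then (d1, x)
    else match fuel with
      | 0 => (d1, p)
      | f + 1 => findA f d1 p

-- one iteration of A's loop body (state = (table, count)); non-pair rows are excluded by Pre_
def stepA (st : PySem.Dict Int Int × Int) (e : List Int) : PySem.Dict Int Int × Int :=
  match e with
  | [u, v] =>
    let r1 := findA (st.1.size + 1) st.1 u
    let r2 := findA (r1.1.size + 1) r1.1 v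
    if r1.2 = r2.2 then (r2.1, st.2 + 1)
    else
      -- union(start, end): table[find(start)] = find(end); Python evaluates the RHS find first
      let ry := findA (r2.1.size + 1) r2.1 v
      let rx := findA (ry.1.size + 1) ry.1 u
      (PySem.Dict.insert rx.1 rx.2 ry.2, st.2)
  | _ => st

def makeConnected (n : Int) (connections : List (List Int)) : Int :=
  let size : Int := connections.length
  if size < n - 1 then -1
  else
    let st := connections.foldl stepA (PySem.Dict.empty, 0)
    st.2 - (size - n + 1)

-- ===== PORT B =====
-- one iteration of B's loop body (state = (comp, merges))
def stepB (st : PySem.Dict Int Int × Int) (e : List Int) : PySem.Dict Int Int × Int :=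
  match e with
  | [u, v] =>
    let c1 := PySem.Dict.setdefault st.1 u u
    let cu := PySem.Dict.getD c1 u u
    let c2 := PySem.Dict.setdefault c1 v v
    let cv := PySem.Dict.getD c2 v v
    if cu = cv then (c2, st.2)
    else
      (PySem.Dict.mk ((PySem.Dict.items c2).map (fun p => (p.1, if p.2 = cu then cv else p.2))),
       st.2 + 1)
  | _ => st

def makeConnected_alt (n : Int) (connections : List (List Int)) : Int :=
  if (connections.length : Int) < n - 1 then -1
  else
    let st := connections.foldl stepB (PySem.Dict.empty, 0)
    n - 1 - st.2

-- ===== PRECONDITION & SPEC =====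
-- Pre_ excludes only inputs on which A raises: when the loop runs (len(connections) ≥ n-1),
-- every row must unpack as 'start, end', i.e. have exactly 2 elements.
def Pre_makeConnected (n : Int) (connections : List (List Int)) : Prop :=
  (connections.length : Int) < n - 1 ∨ ∀ c ∈ connections, c.length = 2
instance (n : Int) (connections : List (List Int)) : Decidable (Pre_makeConnected n connections) := by
  unfold Pre_makeConnected; infer_instance
def pvWitness_makeConnected : Int × List (List Int) := (2, [[0, 1], [1, 0]])

def Spec_makeConnected (n : Int) (connections : List (List Int)) (out : Int) : Prop := out = makeConnected_alt n connections
instance (n : Int) (connections : List (List Int)) (out : Int) : Decidable (Spec_makeConnected n connections out) := by unfold Spec_makeConnected; infer_instance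

-- ===== CLAIM (what is proved, stated in full; the proofs are below) =====
def Claim_equal_makeConnected : Prop := ∀ (n : Int) (connections : List (List Int)), Dom_makeConnected n connections → Pre_makeConnected n connections → Spec_makeConnected n connections (makeConnected n connections)

-- ===== LEMMAS AND PROOFS =====

-- parent of x in A's table (missing keys are their own parent, as after setdefault)
def pr (d : PySem.Dict Int Int) (x : Int) : Int := PySem.Dict.getD d x x

-- follow parents for at most (fuel+? ) steps
def rootN : Nat → PySem.Dict Int Int → Int → Option Int
  | 0, d, x => if pr d x = x then some x else none
  | f + 1, d, x => if pr d x = x then some x else rootN f d (pr d x)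

-- number of non-root keys (an upper bound on any parent-chain length in a forest)
def nr (d : PySem.Dict Int Int) : Nat :=
  ((PySem.Dict.keys d).filter (fun k => !(pr d k == k))).length

def rootV (d : PySem.Dict Int Int) (x : Int) : Int := (rootN (nr d) d x).getD x

def Closed (d : PySem.Dict Int Int) : Prop :=
  ∀ p ∈ PySem.Dict.items d, PySem.Dict.contains d p.2 = true

def Term (d : PySem.Dict Int Int) : Prop := ∀ x, (rootN (nr d) d x).isSome

-- the coupled invariant between A's table d and B's label dict c
def UFInv (d c : PySem.Dict Int Int) : Prop :=
  (PySem.Dict.keys d).Nodup ∧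
  PySem.Dict.keys d = PySem.Dict.keys c ∧
  Closed d ∧ Term d ∧
  (∀ x, pr c x = rootV d x)

lemma rootN_mono : ∀ (f g : Nat) (d : PySem.Dict Int Int) (x r : Int),
    f ≤ g → rootN f d x = some r → rootN g d x = some r := by
  intro f
  induction f with
  | zero =>
    intro g d x r _ h
    simp only [rootN] at h
    split at h
    · cases g <;> simp only [rootN] <;> simp_all
    · exact absurd h (by simp)
  | succ f ih =>
    intro g d x r hle h
    obtain ⟨g', rfl⟩ : ∃ g', g = g' + 1 := ⟨g - 1, by omega⟩
    simp only [rootN] at h ⊢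
    split at h
    · rename_i hx
      rw [if_pos hx]; simp_all
    · rename_i hne
      rw [if_neg hne]
      exact ih g' d (pr d x) r (by omega) h

lemma rootN_congr : ∀ (f : Nat) (d d' : PySem.Dict Int Int) (x : Int),
    (∀ z, pr d z = pr d' z) → rootN f d x = rootN f d' x := by
  intro f
  induction f with
  | zero => intro d d' x h; simp only [rootN, h]
  | succ f ih => intro d d' x h; simp only [rootN, h]; split <;> [rfl; exact ih d d' _ h]

lemma contains_of_pr_ne {d : PySem.Dict Int Int} {x : Int} (h : pr d x ≠ x) :
    PySem.Dict.contains d x = true := by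
  by_contra hc
  exact h (PySem.Dict.getD_of_not_contains d x (by simpa using hc))

lemma pr_setdefault (d : PySem.Dict Int Int) (x z : Int) :
    pr (PySem.Dict.setdefault d x x) z = pr d z := by
  by_cases hc : PySem.Dict.contains d x = true
  · rw [PySem.Dict.setdefault_of_contains d x hc]
  · rw [PySem.Dict.setdefault_of_not_contains d x (by simpa using hc)]
    unfold pr
    rw [PySem.Dict.getD_insert]
    split
    · rename_i hz; subst hz
      exact (PySem.Dict.getD_of_not_contains _ _ (by simpa using hc)).symm
    · rfl

lemma get?_of_contains_pr {d : PySem.Dict Int Int} {x : Int}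
    (hc : PySem.Dict.contains d x = true) : PySem.Dict.get? d x = some (pr d x) := by
  have h1 : (PySem.Dict.get? d x).isSome := by
    rw [← PySem.Dict.contains_eq_isSome_get?]; exact hc
  obtain ⟨w, hw⟩ := Option.isSome_iff_exists.mp h1
  rw [hw]
  unfold pr
  rw [PySem.Dict.getD_of_get?_eq_some d x hw]

lemma closed_pr_mem {d : PySem.Dict Int Int} {x : Int} (hC : Closed d)
    (hc : PySem.Dict.contains d x = true) : PySem.Dict.contains d (pr d x) = true :=
  hC (x, pr d x) (PySem.Dict.mem_items_of_get?_eq_some d (get?_of_contains_pr hc))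

lemma findA_spec : ∀ (g fuel : Nat) (d : PySem.Dict Int Int) (x r : Int),
    Closed d → rootN g d x = some r → g ≤ fuel →
    findA fuel d x = (PySem.Dict.setdefault d x x, r) := by
  intro g
  induction g with
  | zero =>
    intro fuel d x r _ h _
    simp only [rootN] at h
    split at h
    · rename_i hx
      obtain rfl : x = r := by simpa using h
      cases fuel <;>
        · simp only [findA]
          rw [if_pos (by rw [show PySem.Dict.getD (PySem.Dict.setdefault d x x) x x = pr (PySem.Dict.setdefault d x x) x from rfl, pr_setdefault]; exact hx)]
    · exact absurd h (by simp)
  | succ g ih =>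
    intro fuel d x r hC h hle
    simp only [rootN] at h
    split at h
    · rename_i hx
      obtain rfl : x = r := by simpa using h
      cases fuel <;>
        · simp only [findA]
          rw [if_pos (by rw [show PySem.Dict.getD (PySem.Dict.setdefault d x x) x x = pr (PySem.Dict.setdefault d x x) x from rfl, pr_setdefault]; exact hx)]
    · rename_i hx
      have hc : PySem.Dict.contains d x = true := contains_of_pr_ne hx
      have hdd : PySem.Dict.setdefault d x x = d := PySem.Dict.setdefault_of_contains d x hc
      obtain ⟨f, rfl⟩ : ∃ f, fuel = f + 1 := ⟨fuel - 1, by omega⟩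
      simp only [findA, hdd]
      split
      · rename_i h'; exact absurd h' hx
      · have hcp : PySem.Dict.contains d (pr d x) = true := closed_pr_mem hC hc
        have h2 := ih f d (pr d x) r hC h (by omega)
        rw [PySem.Dict.setdefault_of_contains d (pr d x) hcp] at h2
        exact h2

lemma rootV_spec {d : PySem.Dict Int Int} (hT : Term d) (y : Int) :
    rootN (nr d) d y = some (rootV d y) := by
  obtain ⟨r, hr⟩ := Option.isSome_iff_exists.mp (hT y)
  simp [rootV, hr]

lemma rootN_fix : ∀ (g : Nat) (d : PySem.Dict Int Int) (x r : Int),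
    rootN g d x = some r → pr d r = r := by
  intro g
  induction g with
  | zero =>
    intro d x r h
    simp only [rootN] at h
    split at h
    · rename_i hx
      obtain rfl : x = r := by simpa using h
      exact hx
    · simp at h
  | succ g ih =>
    intro d x r h
    simp only [rootN] at h
    split at h
    · rename_i hx
      obtain rfl : x = r := by simpa using h
      exact hx
    · exact ih d (pr d x) r h

lemma rootN_keys : ∀ (g : Nat) (d : PySem.Dict Int Int) (x r : Int),
    Closed d → PySem.Dict.contains d x = true → rootN g d x = some r →
    PySem.Dict.contains d r = true := by
  intro g
  induction g with
  | zero =>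
    intro d x r _ hc h
    simp only [rootN] at h
    split at h
    · obtain rfl : x = r := by simpa using h
      exact hc
    · simp at h
  | succ g ih =>
    intro d x r hC hc h
    simp only [rootN] at h
    split at h
    · obtain rfl : x = r := by simpa using h
      exact hc
    · exact ih d (pr d x) r hC (closed_pr_mem hC hc) h

lemma size_eq_keys_length (d : PySem.Dict Int Int) : d.size = (PySem.Dict.keys d).length := by
  simp [PySem.Dict.size, PySem.Dict.keys]

lemma nr_le_size (d : PySem.Dict Int Int) : nr d ≤ d.size := by
  rw [size_eq_keys_length]
  exact List.length_filter_le _ _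

lemma contains_congr_keys {d c : PySem.Dict Int Int} (h : PySem.Dict.keys d = PySem.Dict.keys c)
    (x : Int) : PySem.Dict.contains d x = PySem.Dict.contains c x := by
  rw [PySem.Dict.contains_eq_decide_mem_keys, PySem.Dict.contains_eq_decide_mem_keys, h]

lemma not_mem_keys_of_not_contains {d : PySem.Dict Int Int} {x : Int}
    (h : ¬ PySem.Dict.contains d x = true) : x ∉ PySem.Dict.keys d := by
  intro hm; exact h ((PySem.Dict.contains_iff_mem_keys d x).mpr hm)

-- setdefault x x preserves everything relevant
lemma nodup_keys_setdefault {d : PySem.Dict Int Int} (x : Int)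
    (h : (PySem.Dict.keys d).Nodup) : (PySem.Dict.keys (d.setdefault x x)).Nodup := by
  by_cases hc : PySem.Dict.contains d x = true
  · rw [PySem.Dict.setdefault_of_contains d x hc]; exact h
  · rw [PySem.Dict.setdefault_of_not_contains d x (by simpa using hc)]
    rw [PySem.Dict.keys_insert_of_not_contains d x (by simpa using hc)]
    simp only [List.nodup_append]
    refine ⟨h, by simp, ?_⟩
    intro a ha b hb
    have hbx : b = x := by simpa using hb
    subst hbx
    intro hax
    exact (not_mem_keys_of_not_contains hc) (hax ▸ ha)

lemma keys_setdefault (d : PySem.Dict Int Int) (x : Int) :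
    PySem.Dict.keys (d.setdefault x x) =
      if PySem.Dict.contains d x = true then PySem.Dict.keys d else PySem.Dict.keys d ++ [x] := by
  by_cases hc : PySem.Dict.contains d x = true
  · rw [PySem.Dict.setdefault_of_contains d x hc, if_pos hc]
  · rw [PySem.Dict.setdefault_of_not_contains d x (by simpa using hc), if_neg hc]
    exact PySem.Dict.keys_insert_of_not_contains d x (by simpa using hc)

lemma closed_setdefault {d : PySem.Dict Int Int} (x : Int) (h : Closed d) :
    Closed (d.setdefault x x) := by
  by_cases hc : PySem.Dict.contains d x = true
  · rw [PySem.Dict.setdefault_of_contains d x hc]; exact h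
  · rw [PySem.Dict.setdefault_of_not_contains d x (by simpa using hc)]
    intro p hp
    rw [PySem.Dict.items_insert_of_not_contains d x (by simpa using hc)] at hp
    rw [PySem.Dict.contains_insert]
    rcases List.mem_append.mp hp with hp | hp
    · simp [h p hp]
    · simp at hp; simp [hp]

lemma rootN_setdefault (d : PySem.Dict Int Int) (x : Int) (g : Nat) (y : Int) :
    rootN g (d.setdefault x x) y = rootN g d y :=
  rootN_congr g _ d y (fun z => pr_setdefault d x z)

lemma nr_setdefault (d : PySem.Dict Int Int) (x : Int) : nr (d.setdefault x x) = nr d := by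
  unfold nr
  rw [keys_setdefault]
  have hcong : ∀ l : List Int,
      l.filter (fun k => !(pr (d.setdefault x x) k == k)) = l.filter (fun k => !(pr d k == k)) := by
    intro l; exact List.filter_congr (fun k _ => by rw [pr_setdefault])
  by_cases hc : PySem.Dict.contains d x = true
  · rw [if_pos hc, hcong]
  · rw [if_neg hc, hcong, List.filter_append]
    have hx : pr d x = x := PySem.Dict.getD_of_not_contains d x (by simpa using hc)
    simp [hx]

lemma term_setdefault {d : PySem.Dict Int Int} (x : Int) (h : Term d) :
    Term (d.setdefault x x) := by
  intro y
  rw [nr_setdefault, rootN_setdefault]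
  exact h y

lemma rootV_setdefault (d : PySem.Dict Int Int) (x y : Int) :
    rootV (d.setdefault x x) y = rootV d y := by
  unfold rootV
  rw [nr_setdefault, rootN_setdefault]

-- quick-find relabel dict
def relabel (c : PySem.Dict Int Int) (cu cv : Int) : PySem.Dict Int Int :=
  PySem.Dict.mk ((PySem.Dict.items c).map (fun p => (p.1, if p.2 = cu then cv else p.2)))

lemma keys_relabel (c : PySem.Dict Int Int) (cu cv : Int) :
    PySem.Dict.keys (relabel c cu cv) = PySem.Dict.keys c := by
  simp [relabel, PySem.Dict.keys]

lemma items_mk (l : List (Int × Int)) : PySem.Dict.items (PySem.Dict.mk l) = l := rfl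

lemma pr_relabel {c : PySem.Dict Int Int} {cu : Int} (cv : Int)
    (hnd : (PySem.Dict.keys c).Nodup) (hcu : cu ∈ PySem.Dict.keys c) (x : Int) :
    pr (relabel c cu cv) x = if pr c x = cu then cv else pr c x := by
  have hndr : (PySem.Dict.keys (relabel c cu cv)).Nodup := by rw [keys_relabel]; exact hnd
  by_cases hc : PySem.Dict.contains c x = true
  · have hget := get?_of_contains_pr hc
    have hmem : (x, pr c x) ∈ PySem.Dict.items c := PySem.Dict.mem_items_of_get?_eq_some c hget
    have hmem' : (x, if pr c x = cu then cv else pr c x) ∈ PySem.Dict.items (relabel c cu cv) := by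
      rw [relabel, items_mk]
      exact List.mem_map.mpr ⟨(x, pr c x), hmem, rfl⟩
    exact PySem.Dict.getD_of_mem_items _ hmem' hndr x
  · have hx : pr c x = x := PySem.Dict.getD_of_not_contains c x (by simpa using hc)
    have hxne : x ≠ cu := by
      intro hxe; subst hxe
      exact (not_mem_keys_of_not_contains hc) hcu
    rw [hx, if_neg hxne]
    have hc' : ¬ PySem.Dict.contains (relabel c cu cv) x = true := by
      rw [contains_congr_keys (keys_relabel c cu cv)]; exact hc
    exact PySem.Dict.getD_of_not_contains _ x (by simpa using hc')

lemma pr_insert (d : PySem.Dict Int Int) (ru rv z : Int) :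
    pr (d.insert ru rv) z = if z = ru then rv else pr d z := by
  unfold pr
  rw [PySem.Dict.getD_insert]

lemma rootN_insert_root {d : PySem.Dict Int Int} {ru rv : Int}
    (hru : pr d ru = ru) (hrv : pr d rv = rv) (hne : ru ≠ rv) :
    ∀ (g : Nat) (y r : Int), rootN g d y = some r →
      rootN (g + 1) (d.insert ru rv) y = some (if r = ru then rv else r) := by
  have hpr' : ∀ z, pr (d.insert ru rv) z = if z = ru then rv else pr d z := pr_insert d ru rv
  have hroot_rv : ∀ g, rootN g (d.insert ru rv) rv = some rv := by
    intro g
    have : pr (d.insert ru rv) rv = rv := by rw [hpr', if_neg (Ne.symm hne)]; exact hrv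
    cases g <;> simp [rootN, this]
  have hcase_root : ∀ (g : Nat) (y : Int), pr d y = y →
      rootN (g + 1) (d.insert ru rv) y = some (if y = ru then rv else y) := by
    intro g y hy
    by_cases hyr : y = ru
    · subst hyr
      rw [if_pos rfl]
      have h1 : pr (d.insert y rv) y = rv := by rw [hpr', if_pos rfl]
      simp only [rootN]
      rw [h1, if_neg (Ne.symm hne)]
      exact hroot_rv g
    · rw [if_neg hyr]
      have h1 : pr (d.insert ru rv) y = y := by rw [hpr', if_neg hyr]; exact hy
      simp only [rootN]
      rw [h1, if_pos rfl]
  intro g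
  induction g with
  | zero =>
    intro y r h
    simp only [rootN] at h
    split at h
    · rename_i hy
      obtain rfl : y = r := by simpa using h
      exact hcase_root 0 y hy
    · simp at h
  | succ g ih =>
    intro y r h
    simp only [rootN] at h
    split at h
    · rename_i hy
      obtain rfl : y = r := by simpa using h
      exact hcase_root (g + 1) y hy
    · rename_i hy
      have hyne : y ≠ ru := by intro he; subst he; exact hy hru
      have h1 : pr (d.insert ru rv) y = pr d y := by rw [hpr', if_neg hyne]
      have := ih (pr d y) r h
      simp only [rootN, h1, if_neg hy]
      exact this

lemma filter_succ_le {l : List Int} {p q : Int → Bool} {a : Int}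
    (ha : a ∈ l) (hnd : l.Nodup) (hx : ∀ x ∈ l, x ≠ a → p x = q x)
    (hpa : p a = false) (hqa : q a = true) :
    (l.filter p).length + 1 ≤ (l.filter q).length := by
  induction l with
  | nil => simp at ha
  | cons b t ih =>
    rcases List.mem_cons.mp ha with rfl | hat
    · have hteq : t.filter p = t.filter q := by
        apply List.filter_congr
        intro y hyt
        have hy : y ≠ a := fun he => (List.nodup_cons.mp hnd).1 (he ▸ hyt)
        exact hx y (List.mem_cons_of_mem _ hyt) hy
      simp [hpa, hqa, hteq]
    · have hba : b ≠ a := by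
        intro he; subst he
        exact (List.nodup_cons.mp hnd).1 hat
      have hpq := hx b List.mem_cons_self hba
      have hih := ih hat (List.nodup_cons.mp hnd).2 (fun x hxt hxa => hx x (List.mem_cons_of_mem _ hxt) hxa)
      simp only [List.filter_cons, ← hpq]
      cases hb : p b <;> simp <;> omega

lemma nr_insert_succ {d : PySem.Dict Int Int} {ru rv : Int}
    (hnd : (PySem.Dict.keys d).Nodup) (hmem : ru ∈ PySem.Dict.keys d)
    (hru : pr d ru = ru) (hne : ru ≠ rv) :
    nr d + 1 ≤ nr (d.insert ru rv) := by
  unfold nr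
  rw [PySem.Dict.keys_insert_of_contains d rv ((PySem.Dict.contains_iff_mem_keys d ru).mpr hmem)]
  apply filter_succ_le hmem hnd
  · intro x _ hxa
    rw [pr_insert, if_neg hxa]
  · simp [hru]
  · have : pr (d.insert ru rv) ru = rv := by rw [pr_insert, if_pos rfl]
    simp [this, Ne.symm hne]

lemma closed_insert_root {d : PySem.Dict Int Int} {ru rv : Int}
    (hC : Closed d) (hcru : PySem.Dict.contains d ru = true)
    (hcrv : PySem.Dict.contains d rv = true) :
    Closed (d.insert ru rv) := by
  intro p hp
  rw [PySem.Dict.items_insert_of_contains d rv hcru] at hp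
  obtain ⟨q, hq, hqe⟩ := List.mem_map.mp hp
  have hkeys := PySem.Dict.keys_insert_of_contains d rv hcru
  have hcont : ∀ z, PySem.Dict.contains (d.insert ru rv) z = PySem.Dict.contains d z :=
    contains_congr_keys hkeys
  rw [hcont]
  split at hqe
  · rw [← hqe]; exact hcrv
  · rw [← hqe]; exact hC q hq

-- the merge-case root/term update, packaged
lemma merge_update {d : PySem.Dict Int Int} {ru rv : Int}
    (hnd : (PySem.Dict.keys d).Nodup) (hT : Term d)
    (hmem : ru ∈ PySem.Dict.keys d)
    (hru : pr d ru = ru) (hrv : pr d rv = rv) (hne : ru ≠ rv) :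
    Term (d.insert ru rv) ∧
    (∀ y, rootV (d.insert ru rv) y = if rootV d y = ru then rv else rootV d y) := by
  have hstep : ∀ y, rootN (nr (d.insert ru rv)) (d.insert ru rv) y =
      some (if rootV d y = ru then rv else rootV d y) := by
    intro y
    have h1 := rootV_spec hT y
    have h2 := rootN_insert_root hru hrv hne (nr d) y (rootV d y) h1
    exact rootN_mono _ _ _ _ _ (nr_insert_succ hnd hmem hru hne) h2
  constructor
  · intro y; rw [hstep y]; rfl
  · intro y; unfold rootV; rw [hstep y]; rfl

lemma ufinv_empty : UFInv PySem.Dict.empty PySem.Dict.empty := by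
  refine ⟨by simp [PySem.Dict.keys_empty], rfl, ?_, ?_, ?_⟩
  · intro p hp; simp [PySem.Dict.empty] at hp
  · intro x
    have : pr (PySem.Dict.empty : PySem.Dict Int Int) x = x := by
      simp [pr, PySem.Dict.getD_empty]
    simp [nr, rootN, this]
  · intro x
    have h0 : pr (PySem.Dict.empty : PySem.Dict Int Int) x = x := by
      simp [pr, PySem.Dict.getD_empty]
    simp [h0, rootV, nr, rootN]

lemma uf_setdefault {d c : PySem.Dict Int Int} (x : Int) (h : UFInv d c) :
    UFInv (d.setdefault x x) (c.setdefault x x) := by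
  obtain ⟨hnd, hkeys, hC, hT, hlab⟩ := h
  refine ⟨nodup_keys_setdefault x hnd, ?_, closed_setdefault x hC, term_setdefault x hT, ?_⟩
  · rw [keys_setdefault, keys_setdefault, contains_congr_keys hkeys x, hkeys]
  · intro y
    rw [show pr (c.setdefault x x) y = pr c y from pr_setdefault c x y, rootV_setdefault, hlab y]

lemma mem_keys_setdefault_self (d : PySem.Dict Int Int) (x : Int) :
    x ∈ PySem.Dict.keys (d.setdefault x x) := by
  rw [keys_setdefault]
  by_cases hc : PySem.Dict.contains d x = true
  · rw [if_pos hc]; exact (PySem.Dict.contains_iff_mem_keys d x).mp hc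
  · rw [if_neg hc]; simp

lemma mem_keys_setdefault_of_mem {d : PySem.Dict Int Int} {y : Int} (x : Int)
    (h : y ∈ PySem.Dict.keys d) : y ∈ PySem.Dict.keys (d.setdefault x x) := by
  rw [keys_setdefault]
  split
  · exact h
  · exact List.mem_append_left _ h

lemma step_case (d c : PySem.Dict Int Int) (k m : Int) (u v : Int) (h : UFInv d c) :
    ∃ d' c',
      UFInv d' c' ∧
      ((stepA (d, k) [u, v] = (d', k + 1) ∧ stepB (c, m) [u, v] = (c', m)) ∨
       (stepA (d, k) [u, v] = (d', k) ∧ stepB (c, m) [u, v] = (c', m + 1))) := by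
  obtain ⟨hnd, hkeys, hC, hT, hlab⟩ := h
  have h1 : UFInv (d.setdefault u u) (c.setdefault u u) :=
    uf_setdefault u ⟨hnd, hkeys, hC, hT, hlab⟩
  have h2 : UFInv ((d.setdefault u u).setdefault v v) ((c.setdefault u u).setdefault v v) :=
    uf_setdefault v h1
  obtain ⟨hnd1, hkeys1, hC1, hT1, hlab1⟩ := h1
  obtain ⟨hnd2, hkeys2, hC2, hT2, hlab2⟩ := h2
  set d1 := d.setdefault u u with hd1
  set d2 := d1.setdefault v v with hd2
  set c1 := c.setdefault u u with hc1
  set c2 := c1.setdefault v v with hc2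
  set ru := rootV d u with hru
  set rv := rootV d v with hrv
  -- the four find calls of A
  have hfind1 : findA (d.size + 1) d u = (d1, ru) :=
    findA_spec (nr d) (d.size + 1) d u ru hC (rootV_spec hT u) (by have := nr_le_size d; omega)
  have hrv1 : rootV d1 v = rv := rootV_setdefault d u v
  have hfind2 : findA (d1.size + 1) d1 v = (d2, rv) := by
    have := findA_spec (nr d1) (d1.size + 1) d1 v (rootV d1 v) hC1 (rootV_spec hT1 v)
      (by have := nr_le_size d1; omega)
    rw [hrv1] at this
    exact this
  have hmem_u2 : u ∈ PySem.Dict.keys d2 :=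
    mem_keys_setdefault_of_mem v (mem_keys_setdefault_self d u)
  have hmem_v2 : v ∈ PySem.Dict.keys d2 := mem_keys_setdefault_self d1 v
  have hcu2 : PySem.Dict.contains d2 u = true := (PySem.Dict.contains_iff_mem_keys d2 u).mpr hmem_u2
  have hcv2 : PySem.Dict.contains d2 v = true := (PySem.Dict.contains_iff_mem_keys d2 v).mpr hmem_v2
  have hsd2v : d2.setdefault v v = d2 := PySem.Dict.setdefault_of_contains d2 v hcv2
  have hsd2u : d2.setdefault u u = d2 := PySem.Dict.setdefault_of_contains d2 u hcu2
  have hrv2 : rootV d2 v = rv := by rw [hd2, rootV_setdefault, hrv1]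
  have hru2 : rootV d2 u = ru := by rw [hd2, rootV_setdefault, hd1, rootV_setdefault]
  have hfind3 : findA (d2.size + 1) d2 v = (d2, rv) := by
    have := findA_spec (nr d2) (d2.size + 1) d2 v (rootV d2 v) hC2 (rootV_spec hT2 v)
      (by have := nr_le_size d2; omega)
    rw [hrv2, hsd2v] at this
    exact this
  have hfind4 : findA (d2.size + 1) d2 u = (d2, ru) := by
    have := findA_spec (nr d2) (d2.size + 1) d2 u (rootV d2 u) hC2 (rootV_spec hT2 u)
      (by have := nr_le_size d2; omega)
    rw [hru2, hsd2u] at this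
    exact this
  -- the two labels of B
  have hcu : PySem.Dict.getD c1 u u = ru := by
    have : pr c1 u = pr c u := pr_setdefault c u u
    rw [show PySem.Dict.getD c1 u u = pr c1 u from rfl, this, hlab u]
  have hcv : PySem.Dict.getD c2 v v = rv := by
    have e1 : pr c2 v = pr c1 v := pr_setdefault c1 v v
    have e2 : pr c1 v = pr c v := pr_setdefault c u v
    rw [show PySem.Dict.getD c2 v v = pr c2 v from rfl, e1, e2, hlab v]
  by_cases hcase : ru = rv
  · refine ⟨d2, c2, ⟨hnd2, hkeys2, hC2, hT2, hlab2⟩, Or.inl ⟨?_, ?_⟩⟩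
    · simp only [stepA, hfind1, hfind2]
      simp [hcase]
    · simp only [stepB]
      rw [← hc1, ← hc2, hcu, hcv]
      simp [hcase]
  · -- merge case
    have hru_root : pr d2 ru = ru := by
      have := rootV_spec hT2 u
      rw [hru2] at this
      exact rootN_fix _ d2 u ru this
    have hrv_root : pr d2 rv = rv := by
      have := rootV_spec hT2 v
      rw [hrv2] at this
      exact rootN_fix _ d2 v rv this
    have hsome_u : rootN (nr d2) d2 u = some ru := by rw [rootV_spec hT2 u, hru2]
    have hsome_v : rootN (nr d2) d2 v = some rv := by rw [rootV_spec hT2 v, hrv2]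
    have hmem_ru : ru ∈ PySem.Dict.keys d2 :=
      (PySem.Dict.contains_iff_mem_keys d2 ru).mp (rootN_keys _ d2 u ru hC2 hcu2 hsome_u)
    have hmem_rv : rv ∈ PySem.Dict.keys d2 :=
      (PySem.Dict.contains_iff_mem_keys d2 rv).mp (rootN_keys _ d2 v rv hC2 hcv2 hsome_v)
    have hcru : PySem.Dict.contains d2 ru = true := (PySem.Dict.contains_iff_mem_keys d2 ru).mpr hmem_ru
    have hcrv : PySem.Dict.contains d2 rv = true := (PySem.Dict.contains_iff_mem_keys d2 rv).mpr hmem_rv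
    obtain ⟨hT', hrootV'⟩ := merge_update hnd2 hT2 hmem_ru hru_root hrv_root hcase
    have hkeys' : PySem.Dict.keys (d2.insert ru rv) = PySem.Dict.keys d2 :=
      PySem.Dict.keys_insert_of_contains d2 rv hcru
    refine ⟨d2.insert ru rv, relabel c2 ru rv, ⟨?_, ?_, ?_, hT', ?_⟩, Or.inr ⟨?_, ?_⟩⟩
    · rw [hkeys']; exact hnd2
    · rw [hkeys', keys_relabel]; exact hkeys2
    · exact closed_insert_root hC2 hcru hcrv
    · intro y
      have hpj : pr (relabel c2 ru rv) y = if pr c2 y = ru then rv else pr c2 y :=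
        pr_relabel rv (hkeys2 ▸ hnd2) (hkeys2 ▸ hmem_ru) y
      rw [hpj, hlab2 y, hrootV' y]
    · simp only [stepA, hfind1, hfind2]
      simp only [if_neg hcase]
      simp [hfind3, hfind4]
    · simp only [stepB]
      rw [← hc1, ← hc2, hcu, hcv]
      simp only [if_neg hcase]
      rfl

lemma loop_lemma : ∀ (es : List (List Int)) (d c : PySem.Dict Int Int) (k m : Int),
    UFInv d c → (∀ e ∈ es, e.length = 2) →
    (es.foldl stepA (d, k)).2 + (es.foldl stepB (c, m)).2 = k + m + (es.length : Int) := by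
  intro es
  induction es with
  | nil => intro d c k m _ _; simp
  | cons e t ih =>
    intro d c k m h hlen
    obtain ⟨u, v, rfl⟩ : ∃ u v, e = [u, v] :=
      List.length_eq_two.mp (hlen e List.mem_cons_self)
    obtain ⟨d', c', h', hcase⟩ := step_case d c k m u v h
    rcases hcase with ⟨ha, hb⟩ | ⟨ha, hb⟩ <;>
      · simp only [List.foldl_cons, ha, hb]
        rw [ih d' c' _ _ h' (fun e he => hlen e (List.mem_cons_of_mem _ he))]
        push_cast [List.length_cons]
        ring

theorem makeConnected_spec : Claim_equal_makeConnected := by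
  intro n cs _ hpre
  unfold Spec_makeConnected makeConnected makeConnected_alt
  by_cases hlt : (cs.length : Int) < n - 1
  · simp [hlt]
  · simp only [if_neg hlt]
    have hlen : ∀ e ∈ cs, e.length = 2 := by
      rcases hpre with h | h
      · exact absurd h hlt
      · exact h
    have hcount := loop_lemma cs PySem.Dict.empty PySem.Dict.empty 0 0 ufinv_empty hlen
    omega
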